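-- pv_equiv track=rewrite | github.com/Soul-Research-Labs/PIL | engine/integrations/github_app.py | determine_conclusion
-- ===== SOURCE A (Python) =====
-- from enum import Enum
-- from typing import Any
--
-- class CheckConclusion(str, Enum):
--     SUCCESS = "success"
--     FAILURE = "failure"
--     NEUTRAL = "neutral"
--     CANCELLED = "cancelled"
--     ACTION_REQUIRED = "action_required"
--
-- def determine_conclusion(findings: list[dict[str, Any]]) -> CheckConclusion:
--     """Determine check conclusion based on finding severities."""
--     severities = {f.get("severity", "") for f in findings}
--     if "critical" in severities:
--         return CheckConclusion.FAILURE
--     if "high" in severities: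
--         return CheckConclusion.ACTION_REQUIRED
--     if "medium" in severities:
--         return CheckConclusion.NEUTRAL
--     return CheckConclusion.SUCCESS
-- ===== SOURCE B (Python) =====
-- from enum import Enum
--
--
-- class CheckConclusion(str, Enum):
--     SUCCESS = "success"
--     FAILURE = "failure"
--     NEUTRAL = "neutral"
--     CANCELLED = "cancelled"
--     ACTION_REQUIRED = "action_required"
--
--
-- _RANK = {"critical": 0, "high": 1, "medium": 2}
-- _BY_RANK = [
--     CheckConclusion.FAILURE,
--     CheckConclusion.ACTION_REQUIRED,
--     CheckConclusion.NEUTRAL,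
--     CheckConclusion.SUCCESS,
-- ]
--
--
-- def determine_conclusion(findings):
--     """Determine check conclusion based on finding severities."""
--     worst = 3
--     for f in findings:
--         worst = min(worst, _RANK.get(f.get("severity", ""), 3))
--     return _BY_RANK[worst]
-- ===== Notes on version B (the rewrite author's own statement) =====
-- stated objective: alternative
-- what changed: Replaces the set-of-severities construction plus ordered membership tests with a single fold that maintains the minimum severity rank, then maps the final rank to a conclusion by table lookup.
import Mathlib
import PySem

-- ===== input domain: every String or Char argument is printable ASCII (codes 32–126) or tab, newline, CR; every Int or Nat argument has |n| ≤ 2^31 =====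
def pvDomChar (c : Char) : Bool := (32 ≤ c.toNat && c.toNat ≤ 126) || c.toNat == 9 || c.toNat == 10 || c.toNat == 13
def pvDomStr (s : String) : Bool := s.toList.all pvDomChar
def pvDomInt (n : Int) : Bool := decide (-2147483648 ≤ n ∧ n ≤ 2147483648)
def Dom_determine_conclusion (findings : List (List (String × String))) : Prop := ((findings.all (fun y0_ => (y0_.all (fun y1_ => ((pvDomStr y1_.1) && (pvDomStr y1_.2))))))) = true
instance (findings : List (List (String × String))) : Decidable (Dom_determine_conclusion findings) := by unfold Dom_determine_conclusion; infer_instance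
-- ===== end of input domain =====

-- B replaces A's severity set + ordered membership tests with one fold keeping the
-- minimum severity rank, then a table lookup (alternative decomposition, same cost).

-- ===== PORT A =====
def determine_conclusion (findings : List (List (String × String))) : String :=
  let severities := PySem.Set.ofList (findings.map (fun f => PySem.Dict.getD (PySem.Dict.mk f) "severity" ""))
  if severities.contains "critical" then "failure"
  else if severities.contains "high" then "action_required"
  else if severities.contains "medium" then "neutral"
  else "success"

-- ===== PORT B =====
-- _RANK = {"critical": 0, "high": 1, "medium": 2}
def pvRankDict : PySem.Dict String Nat := PySem.Dict.mk [("critical", 0), ("high", 1), ("medium", 2)]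

-- _BY_RANK (the str values of the enum members)
def pvByRank : List String := ["failure", "action_required", "neutral", "success"]

def determine_conclusion_alt (findings : List (List (String × String))) : String :=
  let worst := findings.foldl
    (fun w f => min w (PySem.Dict.getD pvRankDict (PySem.Dict.getD (PySem.Dict.mk f) "severity" "") 3)) 3
  pvByRank.getD worst "success"

-- ===== PRECONDITION & SPEC =====
def Spec_determine_conclusion (findings : List (List (String × String))) (out : String) : Prop := out = determine_conclusion_alt findings
instance (findings : List (List (String × String))) (out : String) : Decidable (Spec_determine_conclusion findings out) := by unfold Spec_determine_conclusion; infer_instance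

-- ===== CLAIM (what is proved, stated in full; the proofs are below) =====
def Claim_equal_determine_conclusion : Prop := ∀ (findings : List (List (String × String))), Dom_determine_conclusion findings → Spec_determine_conclusion findings (determine_conclusion findings)

-- ===== LEMMAS AND PROOFS =====

-- the severity a finding contributes (f.get("severity", ""))
def pvSev (f : List (String × String)) : String := PySem.Dict.getD (PySem.Dict.mk f) "severity" ""

-- B's rank of a severity string, as a four-way conditional
def pvRank (s : String) : Nat := PySem.Dict.getD pvRankDict s 3

set_option maxRecDepth 4000

lemma pvRank_eq (s : String) :
    pvRank s = if s = "critical" then 0 else if s = "high" then 1 else if s = "medium" then 2 else 3 := by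
  unfold pvRank pvRankDict
  rw [PySem.Dict.getD_eq_get?_getD]
  rw [PySem.Dict.get?_mk_cons, PySem.Dict.get?_mk_cons, PySem.Dict.get?_mk_cons]
  simp only [beq_iff_eq, PySem.Dict.get?]
  by_cases h1 : s = "critical" <;> by_cases h2 : s = "high" <;> by_cases h3 : s = "medium" <;>
    subst_eqs <;> simp_all [Ne.symm]

lemma pvRank_le_zero (s : String) : pvRank s ≤ 0 ↔ s = "critical" := by
  rw [pvRank_eq]; split_ifs <;> simp_all

lemma pvRank_le_one (s : String) : pvRank s ≤ 1 ↔ s = "critical" ∨ s = "high" := by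
  rw [pvRank_eq]; split_ifs <;> simp_all

lemma pvRank_le_two (s : String) : pvRank s ≤ 2 ↔ s = "critical" ∨ s = "high" ∨ s = "medium" := by
  rw [pvRank_eq]; split_ifs <;> simp_all

lemma fold_le_iff (l : List (List (String × String))) (a k : Nat) :
    l.foldl (fun w f => min w (pvRank (pvSev f))) a ≤ k ↔ a ≤ k ∨ ∃ f ∈ l, pvRank (pvSev f) ≤ k := by
  induction l generalizing a with
  | nil => simp
  | cons f l ih =>
      simp only [List.foldl_cons, ih, min_le_iff, List.mem_cons]
      constructor
      · rintro (( h | h) | ⟨g, hg, h⟩)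
        · exact Or.inl h
        · exact Or.inr ⟨f, Or.inl rfl, h⟩
        · exact Or.inr ⟨g, Or.inr hg, h⟩
      · rintro (h | ⟨g, (rfl | hg), h⟩)
        · exact Or.inl (Or.inl h)
        · exact Or.inl (Or.inr h)
        · exact Or.inr ⟨g, hg, h⟩

lemma contains_ofList_map (findings : List (List (String × String))) (x : String) :
    PySem.Set.contains (PySem.Set.ofList (findings.map pvSev)) x = true ↔
      ∃ f ∈ findings, pvSev f = x := by
  simp [PySem.Set.contains, PySem.Set.mem_ofList, eq_comm]

-- ===== VERDICT (by name: the statement is the Claim_ definition above) =====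
theorem determine_conclusion_spec : Claim_equal_determine_conclusion := by
  unfold Claim_equal_determine_conclusion Spec_determine_conclusion
  intro findings _
  unfold determine_conclusion determine_conclusion_alt
  simp only []
  have hsev : (fun f => PySem.Dict.getD (PySem.Dict.mk f) "severity" "") = pvSev := rfl
  have hstep : (fun (w : Nat) f =>
      min w (PySem.Dict.getD pvRankDict (PySem.Dict.getD (PySem.Dict.mk f) "severity" "") 3)) =
      (fun w f => min w (pvRank (pvSev f))) := rfl
  rw [hsev, hstep]
  set W := findings.foldl (fun w f => min w (pvRank (pvSev f))) 3 with hW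
  have hle : ∀ k, W ≤ k ↔ 3 ≤ k ∨ ∃ f ∈ findings, pvRank (pvSev f) ≤ k := by
    intro k; rw [hW, fold_le_iff]
  by_cases hc : ∃ f ∈ findings, pvSev f = "critical"
  · have hW0 : W = 0 := by
      have := (hle 0).mpr (Or.inr (by
        obtain ⟨f, hf, h⟩ := hc; exact ⟨f, hf, (pvRank_le_zero _).mpr h⟩))
      omega
    rw [if_pos ((contains_ofList_map findings "critical").mpr hc), hW0]
    rfl
  · rw [if_neg (by
      intro h; exact hc ((contains_ofList_map findings "critical").mp h))]
    by_cases hh : ∃ f ∈ findings, pvSev f = "high"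
    · have hW1 : W = 1 := by
        have h1 := (hle 1).mpr (Or.inr (by
          obtain ⟨f, hf, h⟩ := hh; exact ⟨f, hf, (pvRank_le_one _).mpr (Or.inr h)⟩))
        have h0 : ¬ W ≤ 0 := by
          intro h
          rcases (hle 0).mp h with h' | ⟨f, hf, h'⟩
          · omega
          · exact hc ⟨f, hf, (pvRank_le_zero _).mp h'⟩
        omega
      rw [if_pos ((contains_ofList_map findings "high").mpr hh), hW1]
      rfl
    · rw [if_neg (by
        intro h; exact hh ((contains_ofList_map findings "high").mp h))]
      by_cases hm : ∃ f ∈ findings, pvSev f = "medium"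
      · have hW2 : W = 2 := by
          have h2 := (hle 2).mpr (Or.inr (by
            obtain ⟨f, hf, h⟩ := hm
            exact ⟨f, hf, (pvRank_le_two _).mpr (Or.inr (Or.inr h))⟩))
          have h1 : ¬ W ≤ 1 := by
            intro h
            rcases (hle 1).mp h with h' | ⟨f, hf, h'⟩
            · omega
            · rcases (pvRank_le_one _).mp h' with h'' | h''
              · exact hc ⟨f, hf, h''⟩
              · exact hh ⟨f, hf, h''⟩
          omega
        rw [if_pos ((contains_ofList_map findings "medium").mpr hm), hW2]
        rfl
      · rw [if_neg (by
          intro h; exact hm ((contains_ofList_map findings "medium").mp h))]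
        have hW3 : W = 3 := by
          have h3 := (hle 3).mpr (Or.inl le_rfl)
          have h2 : ¬ W ≤ 2 := by
            intro h
            rcases (hle 2).mp h with h' | ⟨f, hf, h'⟩
            · omega
            · rcases (pvRank_le_two _).mp h' with h'' | h'' | h''
              · exact hc ⟨f, hf, h''⟩
              · exact hh ⟨f, hf, h''⟩
              · exact hm ⟨f, hf, h''⟩
          omega
        rw [hW3]
        rfl
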